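-- pv_equiv track=rewrite | github.com/Quirijnn/Advent-of-Code-2024 | 02-12-2024/Joost/dag2.py | checkUp
-- ===== SOURCE A (Python) =====
-- def checkUp(numbers, dampUsed):
--     #bc
--     if len(numbers) == 1:
--         return 1
--     #increasing means i=0 < i=1
--     diff = numbers[1] - numbers[0]
--
--     #damp exception
--     diffDamp = -1
--     if not dampUsed and len(numbers) > 2:
--         diffDamp = numbers[2] - numbers[0]
--
--     if diff > 0 and diff < 4 :
--         return checkUp(numbers[1:], dampUsed)
--
--     #damp
--     if diffDamp > 0 and diffDamp < 4:
--         return checkUp(numbers[2:], True)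
--
--     #endDamp
--     if not dampUsed and len(numbers) == 2:
--         return 1
--
--     return 0
-- ===== SOURCE B (Python) =====
-- def checkUp(numbers, dampUsed):
--     # Iterative re-decomposition: explicit while-loop over an index p instead of
--     # tail recursion on list slices; same greedy dampener behaviour.
--     p = 0
--     while True:
--         m = len(numbers) - p
--         if m == 1:
--             return 1
--         diff = numbers[p + 1] - numbers[p]
--         if 0 < diff < 4:
--             p += 1
--         elif not dampUsed and m > 2 and 0 < numbers[p + 2] - numbers[p] < 4:
--             dampUsed = True
--             p += 2
--         elif not dampUsed and m == 2:
--             return 1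
--         else:
--             return 0
-- ===== Notes on version B (the rewrite author's own statement) =====
-- stated objective: alternative
-- what changed: Replaced the tail recursion on list slices (numbers[1:], numbers[2:]) by a single explicit while-loop over the original list with an index p and the dampUsed flag, avoiding the O(n) slice copies at each step.
import Mathlib
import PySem

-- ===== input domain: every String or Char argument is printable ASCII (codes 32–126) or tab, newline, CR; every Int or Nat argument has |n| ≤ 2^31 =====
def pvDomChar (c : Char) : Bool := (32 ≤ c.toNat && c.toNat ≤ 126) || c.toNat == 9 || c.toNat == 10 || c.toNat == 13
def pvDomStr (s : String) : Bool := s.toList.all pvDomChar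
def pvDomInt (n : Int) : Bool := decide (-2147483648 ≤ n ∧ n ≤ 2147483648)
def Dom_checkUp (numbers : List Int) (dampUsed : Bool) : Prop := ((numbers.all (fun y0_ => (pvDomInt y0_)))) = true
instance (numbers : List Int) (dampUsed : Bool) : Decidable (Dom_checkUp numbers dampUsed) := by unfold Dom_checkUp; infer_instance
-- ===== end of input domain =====

-- B replaces A's tail recursion on list slices by one explicit index-driven loop; equal return values on nonempty lists (both raise IndexError on []).

-- ===== PORT A =====
-- pyGetD is used where Python indexes; the default 0 is only reached on numbers = [],
-- which Pre_checkUp excludes (Python raises IndexError there).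
def checkUp (numbers : List Int) (dampUsed : Bool) : Int :=
  if numbers.length = 1 then 1
  else
    let diff := PySem.List.pyGetD numbers 1 0 - PySem.List.pyGetD numbers 0 0
    let diffDamp := if !dampUsed ∧ numbers.length > 2 then
        PySem.List.pyGetD numbers 2 0 - PySem.List.pyGetD numbers 0 0 else (-1 : Int)
    if h1 : diff > 0 ∧ diff < 4 then
      checkUp (PySem.List.slice numbers (some 1) none) dampUsed
    else if h2 : diffDamp > 0 ∧ diffDamp < 4 then
      checkUp (PySem.List.slice numbers (some 2) none) true
    else if !dampUsed ∧ numbers.length = 2 then 1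
    else 0
termination_by numbers.length
decreasing_by
  · simp only [PySem.List.slice_from_one, List.length_tail]
    rcases numbers with _ | ⟨a, l⟩
    · exfalso
      have hd : diff = 0 := rfl
      rw [hd] at h1; omega
    · simp only [List.length_cons]; omega
  · have hlen : numbers.length > 2 := by
      by_contra hc
      have hd : diffDamp = -1 := by
        have : diffDamp = if (!dampUsed) = true ∧ numbers.length > 2 then
            PySem.List.pyGetD numbers 2 0 - PySem.List.pyGetD numbers 0 0 else (-1 : Int) := rfl
        rw [this, if_neg (by tauto)]
      rw [hd] at h2; omega
    have : PySem.List.slice numbers (some 2) none = numbers.drop 2 := by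
      have h2' : (2 : Int) = ((2 : Nat) : Int) := rfl
      rw [h2', PySem.List.slice_from_natCast]
    rw [this, List.length_drop]; omega

-- ===== PORT B =====
def checkUpGo (numbers : List Int) (p : Nat) (dampUsed : Bool) : Int :=
  let m : Int := (numbers.length : Int) - (p : Int)
  if m = 1 then 1
  else
    let diff := PySem.List.pyGetD numbers ((p : Int) + 1) 0 - PySem.List.pyGetD numbers (p : Int) 0
    if h1 : 0 < diff ∧ diff < 4 then
      checkUpGo numbers (p + 1) dampUsed
    else if h2 : !dampUsed ∧ m > 2 ∧
        0 < PySem.List.pyGetD numbers ((p : Int) + 2) 0 - PySem.List.pyGetD numbers (p : Int) 0 ∧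
        PySem.List.pyGetD numbers ((p : Int) + 2) 0 - PySem.List.pyGetD numbers (p : Int) 0 < 4 then
      checkUpGo numbers (p + 2) true
    else if !dampUsed ∧ m = 2 then 1
    else 0
termination_by numbers.length - p
decreasing_by
  · by_cases hp : p < numbers.length
    · omega
    · exfalso
      have e1 : PySem.List.pyGetD numbers ((p : Int) + 1) 0 = 0 := by
        have : ((p : Int) + 1) = ((p + 1 : Nat) : Int) := by push_cast; ring
        rw [this, PySem.List.pyGetD_natCast]
        exact List.getD_eq_default _ _ (by omega)
      have e2 : PySem.List.pyGetD numbers ((p : Int)) 0 = 0 := by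
        rw [PySem.List.pyGetD_natCast]
        exact List.getD_eq_default _ _ (by omega)
      have hd : diff = PySem.List.pyGetD numbers ((p : Int) + 1) 0 - PySem.List.pyGetD numbers (p : Int) 0 := rfl
      rw [hd, e1, e2] at h1; omega
  · obtain ⟨-, hm, -⟩ := h2
    omega

def checkUp_alt (numbers : List Int) (dampUsed : Bool) : Int :=
  checkUpGo numbers 0 dampUsed

-- ===== PRECONDITION & SPEC =====
-- Pre_ excludes only the empty list, on which Python A (and B) raise IndexError.
def Pre_checkUp (numbers : List Int) (dampUsed : Bool) : Prop := numbers ≠ []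
instance (numbers : List Int) (dampUsed : Bool) : Decidable (Pre_checkUp numbers dampUsed) := by
  unfold Pre_checkUp; infer_instance
def pvWitness_checkUp : List Int × Bool := ([1, 2, 4], false)

def Spec_checkUp (numbers : List Int) (dampUsed : Bool) (out : Int) : Prop := out = checkUp_alt numbers dampUsed
instance (numbers : List Int) (dampUsed : Bool) (out : Int) : Decidable (Spec_checkUp numbers dampUsed out) := by unfold Spec_checkUp; infer_instance

-- ===== CLAIM (what is proved, stated in full; the proofs are below) =====
def Claim_equal_checkUp : Prop := ∀ (numbers : List Int) (dampUsed : Bool), Dom_checkUp numbers dampUsed → Pre_checkUp numbers dampUsed → Spec_checkUp numbers dampUsed (checkUp numbers dampUsed)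

-- ===== LEMMAS AND PROOFS =====

theorem bridge (l : List Int) (p i : Nat) :
    PySem.List.pyGetD (l.drop p) (i : Int) 0 = l[p + i]?.getD 0 := by
  rw [PySem.List.pyGetD_natCast]
  simp [List.getD, List.getElem?_drop]

theorem go_eq_fuel (n : Nat) : ∀ (numbers : List Int) (p : Nat) (damp : Bool),
    numbers.length - p ≤ n → p < numbers.length →
    checkUpGo numbers p damp = checkUp (numbers.drop p) damp := by
  induction n with
  | zero => intro numbers p damp hle hp; omega
  | succ n ih =>
    intro numbers p damp hle hp
    have hlen : (numbers.drop p).length = numbers.length - p := by simp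
    have c0 : PySem.List.pyGetD numbers (p : Int) 0 = numbers[p]?.getD 0 := by
      simp [List.getD]
    have c1 : PySem.List.pyGetD numbers ((p : Int) + 1) 0 = numbers[p + 1]?.getD 0 := by
      have e : ((p : Int) + 1) = (((p + 1 : Nat)) : Int) := by push_cast; ring
      rw [e, PySem.List.pyGetD_natCast]; simp [List.getD]
    have c2 : PySem.List.pyGetD numbers ((p : Int) + 2) 0 = numbers[p + 2]?.getD 0 := by
      have e : ((p : Int) + 2) = (((p + 2 : Nat)) : Int) := by push_cast; ring
      rw [e, PySem.List.pyGetD_natCast]; simp [List.getD]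
    have b0 : PySem.List.pyGetD (numbers.drop p) 0 0 = numbers[p]?.getD 0 := by
      exact_mod_cast bridge numbers p 0
    have b1 : PySem.List.pyGetD (numbers.drop p) 1 0 = numbers[p + 1]?.getD 0 := by
      exact_mod_cast bridge numbers p 1
    have b2 : PySem.List.pyGetD (numbers.drop p) 2 0 = numbers[p + 2]?.getD 0 := by
      exact_mod_cast bridge numbers p 2
    rw [checkUpGo, checkUp]
    simp only [hlen, b0, b1, b2, c0, c1, c2]
    by_cases hc1 : numbers.length - p = 1
    · rw [if_pos (by omega : ((numbers.length : Int) - (p : Int)) = 1), if_pos hc1]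
    · rw [if_neg (by omega : ¬ ((numbers.length : Int) - (p : Int)) = 1), if_neg hc1]
      set dB : Int := numbers[p + 1]?.getD 0 - numbers[p]?.getD 0 with hdB
      set d2 : Int := numbers[p + 2]?.getD 0 - numbers[p]?.getD 0 with hd2
      have hdrop1 : PySem.List.slice (numbers.drop p) (some 1) none = numbers.drop (p + 1) := by
        rw [PySem.List.slice_from_one, List.tail_drop]
      have hdrop2 : PySem.List.slice (numbers.drop p) (some 2) none = numbers.drop (p + 2) := by
        have h2' : (2 : Int) = ((2 : Nat) : Int) := rfl
        rw [h2', PySem.List.slice_from_natCast, List.drop_drop]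
      by_cases hc2 : 0 < dB ∧ dB < 4
      · rw [dif_pos hc2, dif_pos (show dB > 0 ∧ dB < 4 from hc2), hdrop1]
        exact ih numbers (p + 1) damp (by omega) (by omega)
      · rw [dif_neg hc2, dif_neg (show ¬ (dB > 0 ∧ dB < 4) from hc2)]
        by_cases hcd : (!damp) = true ∧ numbers.length - p > 2
        · rw [if_pos hcd]
          by_cases hc3 : d2 > 0 ∧ d2 < 4
          · rw [dif_pos hc3, dif_pos (show (!damp) = true ∧
                ((numbers.length : Int) - (p : Int)) > 2 ∧ 0 < d2 ∧ d2 < 4 from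
                ⟨hcd.1, by omega, hc3.1, hc3.2⟩), hdrop2]
            exact ih numbers (p + 2) true (by omega) (by omega)
          · rw [dif_neg hc3, dif_neg (show ¬ ((!damp) = true ∧
                ((numbers.length : Int) - (p : Int)) > 2 ∧ 0 < d2 ∧ d2 < 4) from
                fun h => hc3 ⟨h.2.2.1, h.2.2.2⟩)]
            by_cases hc4 : (!damp) = true ∧ numbers.length - p = 2
            · omega
            · rw [if_neg (show ¬ ((!damp) = true ∧ ((numbers.length : Int) - (p : Int)) = 2) from
                fun h => hc4 ⟨h.1, by omega⟩), if_neg hc4]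
        · rw [if_neg hcd]
          rw [dif_neg (show ¬ ((-1 : Int) > 0 ∧ (-1 : Int) < 4) by norm_num)]
          rw [dif_neg (show ¬ ((!damp) = true ∧ ((numbers.length : Int) - (p : Int)) > 2 ∧
              0 < d2 ∧ d2 < 4) from fun h => hcd ⟨h.1, by omega⟩)]
          by_cases hc4 : (!damp) = true ∧ numbers.length - p = 2
          · rw [if_pos (show (!damp) = true ∧ ((numbers.length : Int) - (p : Int)) = 2 from
                ⟨hc4.1, by omega⟩), if_pos hc4]
          · rw [if_neg (show ¬ ((!damp) = true ∧ ((numbers.length : Int) - (p : Int)) = 2) from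
                fun h => hc4 ⟨h.1, by omega⟩), if_neg hc4]

theorem go_eq (numbers : List Int) (p : Nat) (damp : Bool) (hp : p < numbers.length) :
    checkUpGo numbers p damp = checkUp (numbers.drop p) damp :=
  go_eq_fuel (numbers.length - p) numbers p damp (le_refl _) hp

-- ===== VERDICT (by name: the statement is the Claim_ definition above) =====
theorem checkUp_spec : Claim_equal_checkUp := by
  intro numbers damp _ hpre
  unfold Spec_checkUp checkUp_alt
  have := go_eq numbers 0 damp (by unfold Pre_checkUp at hpre; cases numbers with
    | nil => exact absurd rfl hpre
    | cons a l => simp)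
  simp only [List.drop_zero] at this
  exact this.symm
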